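-- pv_equiv track=rewrite | github.com/zoedolan/Vybn | vybn_curvature/vybn_multitime_brownian.py | make_braid_schedule
-- ===== SOURCE A (Python) =====
-- def make_braid_schedule(N):
--     """Schedule: ABAB... with N A-steps and N B-steps."""
--     seq = []
--     a = b = 0
--     while a < N or b < N:
--         if a < N:
--             seq.append('A')
--             a += 1
--         if b < N:
--             seq.append('B')
--             b += 1
--     return seq
-- ===== SOURCE B (Python) =====
-- def make_braid_schedule(N):
--     """Schedule: ABAB... with N A-steps and N B-steps."""
--     return ['A', 'B'] * N
-- ===== Notes on version B (the rewrite author's own statement) =====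
-- stated objective: simpler
-- what changed: Replaced the interleaving while-loop with two lockstep counters by the closed-form list repetition ['A','B'] * N (non-positive N yields [] just as the loop does).
import Mathlib
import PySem

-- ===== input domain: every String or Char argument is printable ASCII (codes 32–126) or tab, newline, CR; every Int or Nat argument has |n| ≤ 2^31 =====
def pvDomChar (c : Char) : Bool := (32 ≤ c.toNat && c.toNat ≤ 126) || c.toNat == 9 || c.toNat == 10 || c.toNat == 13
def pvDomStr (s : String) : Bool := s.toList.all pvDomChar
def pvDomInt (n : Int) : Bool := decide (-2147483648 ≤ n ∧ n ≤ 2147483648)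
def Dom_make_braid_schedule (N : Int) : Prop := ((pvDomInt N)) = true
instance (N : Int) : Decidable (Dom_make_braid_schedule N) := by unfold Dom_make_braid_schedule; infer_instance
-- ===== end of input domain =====

-- B replaces A's interleaving while-loop (two lockstep counters) by the closed-form
-- list repetition ['A','B'] * N; objective: simpler.

-- ===== PORT A =====
-- literal port of A's while-loop: state (seq, a, b), loop while a < N ∨ b < N
def pvBraidLoop (N a b : Int) (seq : List String) : List String :=
  if h : a < N ∨ b < N then
    -- body: 'if a < N: append A; a += 1' then 'if b < N: append B; b += 1'
    if ha : a < N then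
      if hb : b < N then pvBraidLoop N (a + 1) (b + 1) (seq ++ ["A"] ++ ["B"])
      else pvBraidLoop N (a + 1) b (seq ++ ["A"])
    else
      if hb : b < N then pvBraidLoop N a (b + 1) (seq ++ ["B"])
      else seq
  else seq
termination_by ((N - a).toNat + (N - b).toNat)
decreasing_by all_goals omega

def make_braid_schedule (N : Int) : List String :=
  pvBraidLoop N 0 0 []

-- ===== PORT B =====
-- ['A','B'] * N : repetition of the pair, empty for N ≤ 0
def make_braid_schedule_alt (N : Int) : List String :=
  (List.replicate N.toNat (["A", "B"] : List String)).flatten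

-- ===== PRECONDITION & SPEC =====
def Spec_make_braid_schedule (N : Int) (out : List String) : Prop := out = make_braid_schedule_alt N
instance (N : Int) (out : List String) : Decidable (Spec_make_braid_schedule N out) := by unfold Spec_make_braid_schedule; infer_instance

-- ===== CLAIM (what is proved, stated in full; the proofs are below) =====
def Claim_equal_make_braid_schedule : Prop := ∀ (N : Int), Dom_make_braid_schedule N → Spec_make_braid_schedule N (make_braid_schedule N)

-- ===== LEMMAS AND PROOFS =====

-- loop invariant: from the lockstep state a = b = k, the loop appends (N-k).toNat copies of [A,B]
theorem pvBraidLoop_lockstep (n : ℕ) : ∀ (N k : Int) (seq : List String),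
    (N - k).toNat = n →
    pvBraidLoop N k k seq = seq ++ (List.replicate n (["A", "B"] : List String)).flatten := by
  induction n with
  | zero =>
    intro N k seq h
    have hk : ¬ k < N := by omega
    rw [pvBraidLoop.eq_def]
    simp [hk]
  | succ m ih =>
    intro N k seq h
    have hk : k < N := by omega
    rw [pvBraidLoop.eq_def]
    simp only [hk, or_self, dite_true]
    have := ih N (k + 1) (seq ++ ["A"] ++ ["B"]) (by omega)
    simp only [List.append_assoc] at this ⊢
    rw [this]
    simp [List.replicate_succ]

theorem make_braid_schedule_spec : Claim_equal_make_braid_schedule := by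
  intro N _
  unfold Spec_make_braid_schedule make_braid_schedule make_braid_schedule_alt
  have := pvBraidLoop_lockstep (N - 0).toNat N 0 [] rfl
  simpa using this
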